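-- pv_equiv track=rewrite | github.com/FelpBravo/MaestroRezagos | functions/file.py | dividir_descripcion_error
-- ===== SOURCE A (Python) =====
-- def dividir_descripcion_error(desc_error):
--     valor= ''
--     if desc_error:
--         for n in range(1, len(desc_error)+1):
--             if n % 2 == 0:
--                 valor += desc_error[n:n+2] + ';'
--             if n == 1:
--                 valor += desc_error[0:n+1] + ';'
--         valor = valor.rstrip(';')
--     return valor
-- ===== SOURCE B (Python) =====
-- def dividir_descripcion_error(desc_error):
--     if not desc_error:
--         return ''
--     return ';'.join(desc_error[i:i + 2] for i in range(0, len(desc_error), 2)).rstrip(';')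
-- ===== Notes on version B (the rewrite author's own statement) =====
-- stated objective: simpler
-- what changed: B directly joins the 2-character chunks taken at step-2 starts (a semicolon-join over range(0, len, 2)) and strips trailing separators, replacing A's step-1 loop with parity and first-index branches and string += accumulation.
import Mathlib
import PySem

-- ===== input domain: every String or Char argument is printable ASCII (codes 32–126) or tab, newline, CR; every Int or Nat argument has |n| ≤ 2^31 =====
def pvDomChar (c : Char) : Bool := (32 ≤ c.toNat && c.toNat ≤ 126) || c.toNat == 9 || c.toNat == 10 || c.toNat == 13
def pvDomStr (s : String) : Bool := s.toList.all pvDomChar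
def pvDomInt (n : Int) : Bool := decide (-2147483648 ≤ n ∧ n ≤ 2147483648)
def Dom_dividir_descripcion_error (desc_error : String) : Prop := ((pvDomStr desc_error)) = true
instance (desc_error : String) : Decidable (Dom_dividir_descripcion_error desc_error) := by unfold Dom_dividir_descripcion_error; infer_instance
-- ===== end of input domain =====

-- B replaces A's step-1 loop with n%2/n==1 branches and += accumulation by a join of
-- 2-character chunks at step-2 starts followed by stripping trailing separators (objective: simpler).


-- hand port of Python's str.rstrip(';') (PySem has no chars-argument rstrip):
-- drop the trailing run of ';' characters; exact on all strings, shared by both ports.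
def pvRstripSemi (cs : List Char) : List Char := (cs.reverse.dropWhile (· == ';')).reverse

-- ===== PORT A =====
-- the body of A's for-loop, one step: acc is `valor`, n the loop index
def pvStepA (cs : List Char) (acc : List Char) (n : Int) : List Char :=
  let acc := if PySem.Int.mod n 2 = 0
             then acc ++ PySem.List.slice cs (some n) (some (n + 2)) ++ [';'] else acc
  if n = 1 then acc ++ PySem.List.slice cs (some 0) (some (n + 1)) ++ [';'] else acc

def dividir_descripcion_error (desc_error : String) : String :=
  let cs := desc_error.toList
  if cs = [] then ""   -- `if desc_error:` false: valor stays ''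
  else
    String.ofList (pvRstripSemi
      ((PySem.List.pyRange 1 ((cs.length : Int) + 1) 1).foldl (pvStepA cs) []))

-- ===== PORT B =====
def dividir_descripcion_error_alt (desc_error : String) : String :=
  let cs := desc_error.toList
  if cs = [] then ""   -- `if not desc_error: return ''`
  else
    String.ofList (pvRstripSemi
      (PySem.Chars.join [';']
        ((PySem.List.pyRange 0 (cs.length : Int) 2).map
          (fun i => PySem.List.slice cs (some i) (some (i + 2))))))

-- ===== PRECONDITION & SPEC =====
def Spec_dividir_descripcion_error (desc_error : String) (out : String) : Prop := out = dividir_descripcion_error_alt desc_error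
instance (desc_error : String) (out : String) : Decidable (Spec_dividir_descripcion_error desc_error out) := by unfold Spec_dividir_descripcion_error; infer_instance

-- ===== CLAIM (what is proved, stated in full; the proofs are below) =====
def Claim_equal_dividir_descripcion_error : Prop := ∀ (desc_error : String), Dom_dividir_descripcion_error desc_error → Spec_dividir_descripcion_error desc_error (dividir_descripcion_error desc_error)

-- ===== LEMMAS AND PROOFS =====

-- the k-th 2-character chunk of cs
def pvChunk (cs : List Char) (k : Nat) : List Char :=
  PySem.List.slice cs (some (2 * (k : Int))) (some (2 * (k : Int) + 2))

-- rstrip(';') absorbs a trailing ';'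
lemma pvRstripSemi_append_semi (x : List Char) :
    pvRstripSemi (x ++ [';']) = pvRstripSemi x := by
  simp [pvRstripSemi]

-- flatMap with a ';' terminator on each piece = join with ';' plus one trailing ';'
lemma pvJoin_term (l : List (List Char)) (h : l ≠ []) :
    l.flatMap (fun c => c ++ [';']) = PySem.Chars.join [';'] l ++ [';'] := by
  induction l with
  | nil => simp at h
  | cons c rest ih =>
    cases rest with
    | nil => simp [PySem.Chars.join_singleton]
    | cons d rest' =>
      rw [PySem.Chars.join_cons_cons]
      simp only [List.flatMap_cons] at ih ⊢
      rw [ih (by simp)]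
      simp

-- A's fold over range(1, m+1) produces the chunks at starts 0,2,…,2·((m+2)/2 − 1), each ';'-terminated
lemma pvFoldA (cs : List Char) (m : Nat) (hm : 1 ≤ m) :
    (PySem.List.pyRange 1 ((m : Int) + 1) 1).foldl (pvStepA cs) []
      = (List.range ((m + 2) / 2)).flatMap (fun k => pvChunk cs k ++ [';']) := by
  induction m with
  | zero => omega
  | succ m ih =>
    by_cases h1 : m = 0
    · subst h1
      show (PySem.List.pyRange 1 (1 + 1) 1).foldl (pvStepA cs) [] = _
      rw [PySem.List.pyRange_one_singleton]
      simp [pvStepA, pvChunk, PySem.Int.mod, List.range_succ]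
    · have hm' : 1 ≤ m := by omega
      rw [show ((m.succ : Int) + 1) = ((m : Int) + 1) + 1 by push_cast; ring,
          PySem.List.pyRange_one_succ_right (by omega), List.foldl_append, ih hm']
      have hcast : ((m : Int) + 1) = ((m + 1 : Nat) : Int) := by push_cast; ring
      have hmod : PySem.Int.mod ((m : Int) + 1) 2 = (((m + 1) % 2 : Nat) : Int) := by
        rw [hcast]; exact_mod_cast PySem.Int.mod_natCast (m + 1) 2
      simp only [List.foldl_cons, List.foldl_nil]
      unfold pvStepA
      rcases Nat.even_or_odd (m + 1) with he | ho
      · -- m+1 even: the step appends chunk (m+1)/2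
        have h2 : (m + 1) % 2 = 0 := Nat.even_iff.mp he
        have hne1 : ¬ ((m : Int) + 1 = 1) := by omega
        simp only [hmod, h2, Nat.cast_zero, if_neg hne1]
        have hcnt : (m + 1 + 2) / 2 = (m + 2) / 2 + 1 := by omega
        have h2k : (2 * (((m + 2) / 2 : Nat) : Int)) = (m : Int) + 1 := by
          have h : 2 * ((m + 2) / 2) = m + 1 := by omega
          exact_mod_cast congrArg (fun z : Nat => (z : Int)) h
        rw [hcnt, List.range_succ, List.flatMap_append]
        simp only [pvChunk, h2k, List.flatMap_cons, List.flatMap_nil, List.append_nil,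
          List.append_assoc]
        simp
      · -- m+1 odd: the step is the identity
        have h2 : (m + 1) % 2 = 1 := Nat.odd_iff.mp ho
        have hne1 : ¬ ((m : Int) + 1 = 1) := by omega
        have hmodne : ¬ (PySem.Int.mod ((m : Int) + 1) 2 = 0) := by
          rw [hmod, h2]; norm_num
        rw [if_neg hmodne, if_neg hne1]
        have hcnt : (m + 1 + 2) / 2 = (m + 2) / 2 := by omega
        rw [hcnt]

-- B's step-2 range of chunk starts, as List.range over chunk indices
lemma pvChunksB (cs : List Char) (L : Nat) (hL : 1 ≤ L) :
    (PySem.List.pyRange 0 (L : Int) 2).map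
        (fun i => PySem.List.slice cs (some i) (some (i + 2)))
      = (List.range ((L + 1) / 2)).map (pvChunk cs) := by
  rw [PySem.List.pyRange_of_pos 0 (L : Int) (by norm_num), List.map_map]
  have hcnt : (if (0 : Int) < (L : Int) then (((L : Int) - 0 + 2 - 1) / 2).toNat else 0)
      = (L + 1) / 2 := by
    rw [if_pos (by exact_mod_cast hL)]; omega
  rw [hcnt]
  simp [Function.comp, pvChunk]

-- ===== VERDICT (by name: the statement is the Claim_ definition above) =====
theorem dividir_descripcion_error_spec : Claim_equal_dividir_descripcion_error := by
  intro s _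
  unfold Spec_dividir_descripcion_error dividir_descripcion_error dividir_descripcion_error_alt
  by_cases hcs : s.toList = []
  · simp [hcs]
  · simp only [if_neg hcs]
    have hL : 1 ≤ s.toList.length := by
      cases h : s.toList with
      | nil => exact absurd h hcs
      | cons a t => simp
    rw [pvFoldA s.toList s.toList.length hL, pvChunksB s.toList s.toList.length hL]
    have hcB : 1 ≤ (s.toList.length + 1) / 2 := by omega
    have hmapne : (List.range ((s.toList.length + 1) / 2)).map (pvChunk s.toList) ≠ [] := by
      simp only [ne_eq, List.map_eq_nil_iff, List.range_eq_nil]; omega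
    have hflat : (List.range ((s.toList.length + 1) / 2)).flatMap
          (fun k => pvChunk s.toList k ++ [';'])
        = PySem.Chars.join [';']
            ((List.range ((s.toList.length + 1) / 2)).map (pvChunk s.toList)) ++ [';'] := by
      rw [← List.flatMap_map (pvChunk s.toList) (fun c => c ++ [';'])]
      exact pvJoin_term _ hmapne
    rcases Nat.even_or_odd s.toList.length with he | ho
    · -- even length: one extra empty chunk, two trailing ';' to strip
      have hcA : (s.toList.length + 2) / 2 = (s.toList.length + 1) / 2 + 1 := by
        rcases he with ⟨j, hj⟩; omega
      have hlast : pvChunk s.toList ((s.toList.length + 1) / 2) = [] := by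
        have h2k : (2 * ((((s.toList.length + 1) / 2) : Nat) : Int))
            = ((s.toList.length : Nat) : Int) := by
          have h : 2 * ((s.toList.length + 1) / 2) = s.toList.length := by
            rcases he with ⟨j, hj⟩; omega
          exact_mod_cast congrArg (fun z : Nat => (z : Int)) h
        have hsl := PySem.List.slice_natCast_add s.toList s.toList.length 2
        push_cast at hsl
        unfold pvChunk
        rw [h2k, hsl, List.drop_length, List.take_nil]
      rw [hcA, List.range_succ, List.flatMap_append]
      simp only [List.flatMap_cons, List.flatMap_nil, List.append_nil, hlast,
        List.nil_append, hflat]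
      rw [pvRstripSemi_append_semi, pvRstripSemi_append_semi]
    · -- odd length: chunk counts coincide
      have hcA : (s.toList.length + 2) / 2 = (s.toList.length + 1) / 2 := by
        rcases ho with ⟨j, hj⟩; omega
      rw [hcA, hflat, pvRstripSemi_append_semi]
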